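-- pv_equiv track=rewrite | github.com/theabbie/leetcode | miscellaneous/G_Distance_Queries_on_a_Tree.py | DFS
-- ===== SOURCE A (Python) =====
-- def DFS(graph, i, prev, subsizes, order, dists, d):
--     ctr = 1
--     order.append(i)
--     dists.append(d)
--     for j, w in graph[i]:
--         if j != prev:
--             ctr += DFS(graph, j, i, subsizes, order, dists, d + w)
--     subsizes[i] = ctr
--     return ctr
-- ===== SOURCE B (Python) =====
-- def DFS(graph, i, prev, subsizes, order, dists, d):
--     # Iterative replacement for the recursive DFS: an explicit stack yields the
--     # same preorder (children pushed in reverse of adjacency order), then a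
--     # single reverse pass over the discovered nodes fills subsizes bottom-up.
--     # The returned value is the number of visited nodes (= subtree size of i).
--     parent = {}
--     seq = []
--     stack = [(i, prev, d)]
--     while stack:
--         node, par, dist = stack.pop()
--         seq.append(node)
--         parent[node] = par
--         order.append(node)
--         dists.append(dist)
--         for j, w in reversed(graph[node]):
--             if j != par:
--                 stack.append((j, node, dist + w))
--     acc = {}
--     for node in reversed(seq):
--         s = 1 + acc.get(node, 0)
--         subsizes[node] = s
--         p = parent[node]
--         acc[p] = acc.get(p, 0) + s
--     return len(seq)
-- ===== Notes on version B (the rewrite author's own statement) =====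
-- stated objective: alternative
-- what changed: The recursive DFS is replaced by an explicit-stack preorder loop (children pushed in reverse adjacency order) followed by a single reverse pass over the visit sequence that fills the subtree sizes bottom-up; the return value is the count of visited nodes.
import Mathlib
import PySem

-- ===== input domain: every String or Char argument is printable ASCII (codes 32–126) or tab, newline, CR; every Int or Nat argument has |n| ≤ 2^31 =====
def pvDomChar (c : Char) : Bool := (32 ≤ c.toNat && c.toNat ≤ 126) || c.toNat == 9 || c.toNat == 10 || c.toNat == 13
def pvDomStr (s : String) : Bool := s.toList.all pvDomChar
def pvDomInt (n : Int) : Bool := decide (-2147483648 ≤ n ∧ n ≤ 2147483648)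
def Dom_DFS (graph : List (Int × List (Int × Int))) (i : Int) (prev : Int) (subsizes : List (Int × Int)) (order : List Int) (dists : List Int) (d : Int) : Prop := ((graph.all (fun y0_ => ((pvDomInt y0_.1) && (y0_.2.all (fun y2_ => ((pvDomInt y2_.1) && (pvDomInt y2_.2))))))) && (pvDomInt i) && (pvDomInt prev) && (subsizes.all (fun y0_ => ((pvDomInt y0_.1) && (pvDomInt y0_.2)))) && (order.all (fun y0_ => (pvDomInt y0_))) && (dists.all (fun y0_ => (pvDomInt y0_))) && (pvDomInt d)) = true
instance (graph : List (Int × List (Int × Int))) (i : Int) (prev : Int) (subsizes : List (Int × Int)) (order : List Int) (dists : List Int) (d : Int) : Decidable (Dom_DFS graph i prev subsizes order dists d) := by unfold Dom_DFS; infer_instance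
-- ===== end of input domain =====

-- B replaces the recursive DFS by an explicit-stack preorder loop plus a reverse
-- pass for subtree sizes; the equivalence proved here is about the RETURN value
-- only (both A and B mutate the subsizes/order/dists arguments in place; those
-- mutations are not modelled by the ports).

-- Shared fuel bound for both ports: an over-approximation of the number of
-- DFS visits on every input Pre_DFS admits (fuel is a totality guard only;
-- the equivalence below holds for the ports on ALL inputs).
def pvArcs (graph : List (Int × List (Int × Int))) : Nat :=
  (graph.map (fun ka => ka.2.length)).sum

def pvFuel (graph : List (Int × List (Int × Int))) : Nat :=
  (pvArcs graph + 2) ^ ((graph.length + 1) * (graph.length + 1) + 1) + 1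

-- ===== PORT A =====
-- A's recursion is ported with a fuel counter threaded sequentially through the
-- recursive calls (one unit per call); fuel is only a totality guard and the
-- top-level fuel (graph.length + 1) is ample on the inputs Pre_DFS admits.
-- `graph[i]` on the Python dict is first-match lookup, PySem.Dict.get?.
-- The in-place appends to order/dists and the dict write subsizes[i] = ctr do
-- not influence the returned ctr and are not modelled (see header).
mutual
def recA (graph : List (Int × List (Int × Int))) : Nat → Int → Int → Int → Option (Int × Nat)
  | 0, _, _, _ => none
  | fuel+1, i, prev, d =>
    match (PySem.Dict.mk graph).get? i with
    | none => none                                   -- Python: KeyError on graph[i]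
    | some adj => recKidsA graph fuel adj i prev d 1 -- ctr = 1, then the for-loop
  termination_by fuel _ _ _ => (fuel, 0)
  decreasing_by exact Prod.Lex.left _ _ (by omega)

-- the for-loop `for j, w in graph[i]: if j != prev: ctr += DFS(...)`
def recKidsA (graph : List (Int × List (Int × Int))) : Nat → List (Int × Int) → Int → Int → Int → Int → Option (Int × Nat)
  | fuel, [], _, _, _, ctr => some (ctr, fuel)
  | fuel, (j, w) :: rest, i, prev, d, ctr =>
    if j ≠ prev then
      match recA graph fuel j i (d + w) with
      | none => none
      | some (c, fuel') => recKidsA graph (min fuel' fuel) rest i prev d (ctr + c)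
    else recKidsA graph fuel rest i prev d ctr
  termination_by fuel adj _ _ _ _ => (fuel, adj.length + 1)
  decreasing_by
    all_goals simp only [List.length_cons]
    all_goals first
      | exact Prod.Lex.right _ (by omega)
      | exact Prod.Lex.left _ _ (by omega)
      | (rcases Nat.lt_or_eq_of_le (Nat.min_le_right fuel' fuel) with h | h
         · exact Prod.Lex.left _ _ h
         · rw [h]; exact Prod.Lex.right _ (by omega))
end

def DFS (graph : List (Int × List (Int × Int))) (i : Int) (prev : Int) (subsizes : List (Int × Int)) (order : List Int) (dists : List Int) (d : Int) : Int :=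
  match recA graph (pvFuel graph) i prev d with
  | some (c, _) => c
  | none => 0

-- ===== PORT B =====
-- Source B's while-loop over an explicit stack (top of stack = head of the list;
-- Python pushes the reversed adjacency at the END and pops from the END, which
-- is the same pop order).  `seq` collects the visited nodes; Source B returns
-- len(seq).  The parent/acc dicts and the reverse sizes pass only feed the
-- in-place subsizes mutation, which is not modelled (see header).
def stepB (graph : List (Int × List (Int × Int))) : Nat → List (Int × Int × Int) → List Int → Option (List Int)
  | _, [], seq => some seq
  | 0, _ :: _, _ => none                             -- fuel guard only
  | fuel+1, (node, par, dist) :: rest, seq =>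
    match (PySem.Dict.mk graph).get? node with
    | none => none                                   -- Python: KeyError on graph[node]
    | some adj =>
      stepB graph fuel
        (adj.reverse.foldl (fun st jw => if jw.1 ≠ par then (jw.1, node, dist + jw.2) :: st else st) rest)
        (seq ++ [node])
termination_by fuel _ _ => fuel

def DFS_alt (graph : List (Int × List (Int × Int))) (i : Int) (prev : Int) (subsizes : List (Int × Int)) (order : List Int) (dists : List Int) (d : Int) : Int :=
  match stepB graph (pvFuel graph) [(i, prev, d)] [] with
  | some seq => (seq.length : Int)
  | none => 0

-- ===== PRECONDITION & SPEC =====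
-- The non-backtracking successor states of a state (node, parent): every
-- neighbour j ≠ parent of node yields state (j, node).
def pvSuccs (graph : List (Int × List (Int × Int))) (s : Int × Int) : List (Int × Int) :=
  ((PySem.Dict.mk graph).getD s.1 []).filterMap
    (fun jw => if jw.1 ≠ s.2 then some (jw.1, s.1) else none)

def pvStep (graph : List (Int × List (Int × Int))) (T : Finset (Int × Int)) : Finset (Int × Int) :=
  T ∪ T.biUnion (fun s => (pvSuccs graph s).toFinset)

-- Closure of a state set under pvStep (every non-root state corresponds to an
-- adjacency arc, so pvArcs + 1 iterations reach the fixpoint).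
def pvClosure (graph : List (Int × List (Int × Int))) (X : Finset (Int × Int)) : Finset (Int × Int) :=
  (pvStep graph)^[pvArcs graph + 1] X

-- All nodes the traversal can ever stand on, starting from i with parent prev.
def pvReach (graph : List (Int × List (Int × Int))) (i prev : Int) : Finset Int :=
  {i} ∪ (pvClosure graph {(i, prev)}).image Prod.fst

-- Pre_DFS is exactly where Python A returns normally: i is a node, every node
-- the non-backtracking traversal can reach is a key of graph (otherwise
-- KeyError), and the reachable state graph is acyclic (otherwise the recursion
-- never terminates); distinct keys, since a Python dict cannot repeat a key.
def Pre_DFS (graph : List (Int × List (Int × Int))) (i : Int) (prev : Int) (subsizes : List (Int × Int)) (order : List Int) (dists : List Int) (d : Int) : Prop :=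
  (graph.map Prod.fst).Nodup ∧
  i ∈ graph.map Prod.fst ∧
  (∀ x ∈ pvReach graph i prev, x ∈ graph.map Prod.fst) ∧
  (∀ s ∈ pvClosure graph {(i, prev)}, s ∉ pvClosure graph (pvSuccs graph s).toFinset)
instance (graph : List (Int × List (Int × Int))) (i : Int) (prev : Int) (subsizes : List (Int × Int)) (order : List Int) (dists : List Int) (d : Int) : Decidable (Pre_DFS graph i prev subsizes order dists d) := by unfold Pre_DFS; infer_instance

def pvWitness_DFS : (List (Int × List (Int × Int))) × Int × Int × (List (Int × Int)) × List Int × List Int × Int :=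
  ([(0, [(1, 1)]), (1, [(0, 1)])], 0, -1, [], [], [], 0)

def Spec_DFS (graph : List (Int × List (Int × Int))) (i : Int) (prev : Int) (subsizes : List (Int × Int)) (order : List Int) (dists : List Int) (d : Int) (out : Int) : Prop := out = DFS_alt graph i prev subsizes order dists d
instance (graph : List (Int × List (Int × Int))) (i : Int) (prev : Int) (subsizes : List (Int × Int)) (order : List Int) (dists : List Int) (d : Int) (out : Int) : Decidable (Spec_DFS graph i prev subsizes order dists d out) := by unfold Spec_DFS; infer_instance

-- ===== CLAIM (what is proved, stated in full; the proofs are below) =====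
def Claim_equal_DFS : Prop := ∀ (graph : List (Int × List (Int × Int))) (i : Int) (prev : Int) (subsizes : List (Int × Int)) (order : List Int) (dists : List Int) (d : Int), Dom_DFS graph i prev subsizes order dists d → Pre_DFS graph i prev subsizes order dists d → Spec_DFS graph i prev subsizes order dists d (DFS graph i prev subsizes order dists d)

-- ===== LEMMAS AND PROOFS =====

-- The stack frames a pop of (node=i, par=prev, dist=d) pushes, in pop order.
def framesOf (prev i d : Int) (adj : List (Int × Int)) : List (Int × Int × Int) :=
  adj.filterMap (fun jw => if jw.1 ≠ prev then some (jw.1, i, d + jw.2) else none)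

lemma push_eq_frames (prev i d : Int) : ∀ (adj : List (Int × Int)) (st : List (Int × Int × Int)),
    adj.reverse.foldl (fun st jw => if jw.1 ≠ prev then (jw.1, i, d + jw.2) :: st else st) st
      = framesOf prev i d adj ++ st := by
  intro adj
  induction adj with
  | nil => intro st; rfl
  | cons x r ih =>
    intro st
    simp only [List.reverse_cons, List.foldl_append, List.foldl_cons, List.foldl_nil, ih st,
      framesOf, List.filterMap_cons]
    by_cases hx : x.1 ≠ prev <;> simp [hx]

-- Fuel threaded through recA/recKidsA never increases.
lemma fuel_le (graph : List (Int × List (Int × Int))) : ∀ fuel : Nat,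
    (∀ i prev d c fuel', recA graph fuel i prev d = some (c, fuel') → fuel' ≤ fuel) ∧
    (∀ adj i prev d ctr c fuel', recKidsA graph fuel adj i prev d ctr = some (c, fuel') → fuel' ≤ fuel) := by
  intro fuel
  induction fuel using Nat.strong_induction_on with
  | _ fuel IH =>
    have hA : ∀ i prev d c fuel', recA graph fuel i prev d = some (c, fuel') → fuel' ≤ fuel := by
      match fuel with
      | 0 => intro _ _ _ _ _ h; simp [recA] at h
      | s+1 =>
        intro i prev d c fuel' h
        rw [recA] at h
        cases hg : (PySem.Dict.mk graph).get? i with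
        | none => rw [hg] at h; simp at h
        | some adj =>
          rw [hg] at h
          have := (IH s (by omega)).2 adj i prev d 1 c fuel' h
          omega
    refine ⟨hA, ?_⟩
    intro adj
    induction adj with
    | nil =>
      intro i prev d ctr c fuel' h
      rw [recKidsA] at h
      simp at h; omega
    | cons x r ihr =>
      intro i prev d ctr c fuel' h
      obtain ⟨j, w⟩ := x
      simp only [recKidsA] at h
      by_cases hj : j ≠ prev
      · rw [if_pos hj] at h
        cases hr : recA graph fuel j i (d + w) with
        | none => rw [hr] at h; simp at h
        | some p =>
          obtain ⟨c0, f0⟩ := p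
          rw [hr] at h
          have h2 : recKidsA graph (min f0 fuel) r i prev d (ctr + c0) = some (c, fuel') := h
          rcases Nat.lt_or_eq_of_le (Nat.min_le_right f0 fuel) with hlt | heq
          · have := (IH (min f0 fuel) hlt).2 r i prev d (ctr + c0) c fuel' h2
            omega
          · rw [heq] at h2
            exact ihr i prev d (ctr + c0) c fuel' h2
      · simp only [hj, if_false] at h
        exact ihr i prev d ctr c fuel' h

-- Main simulation: the stack machine of B run on a frame (resp. on the frames
-- of an adjacency list) behaves exactly like A's recursion (resp. its for-loop),
-- visiting a block L of nodes whose length is A's counter contribution, and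
-- handing the remaining fuel and stack on.
lemma simulation (graph : List (Int × List (Int × Int))) : ∀ fuel : Nat,
    (∀ i prev d rest seq,
      (recA graph fuel i prev d = none → stepB graph fuel ((i, prev, d) :: rest) seq = none) ∧
      (∀ c fuel', recA graph fuel i prev d = some (c, fuel') →
        ∃ L : List Int, (L.length : Int) = c ∧
          stepB graph fuel ((i, prev, d) :: rest) seq = stepB graph fuel' rest (seq ++ L))) ∧
    (∀ adj i prev d ctr rest seq,
      (recKidsA graph fuel adj i prev d ctr = none →
        stepB graph fuel (framesOf prev i d adj ++ rest) seq = none) ∧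
      (∀ c fuel', recKidsA graph fuel adj i prev d ctr = some (c, fuel') →
        ∃ L : List Int, (L.length : Int) = c - ctr ∧
          stepB graph fuel (framesOf prev i d adj ++ rest) seq = stepB graph fuel' rest (seq ++ L))) := by
  intro fuel
  induction fuel using Nat.strong_induction_on with
  | _ fuel IH =>
    have hA : ∀ i prev d rest seq,
        (recA graph fuel i prev d = none → stepB graph fuel ((i, prev, d) :: rest) seq = none) ∧
        (∀ c fuel', recA graph fuel i prev d = some (c, fuel') →
          ∃ L : List Int, (L.length : Int) = c ∧
            stepB graph fuel ((i, prev, d) :: rest) seq = stepB graph fuel' rest (seq ++ L)) := by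
      match fuel with
      | 0 =>
        intro i prev d rest seq
        constructor
        · intro _; rw [stepB]
        · intro c fuel' h; simp [recA] at h
      | s+1 =>
        intro i prev d rest seq
        have hstep : stepB graph (s+1) ((i, prev, d) :: rest) seq =
            match (PySem.Dict.mk graph).get? i with
            | none => none
            | some adj => stepB graph s (framesOf prev i d adj ++ rest) (seq ++ [i]) := by
          rw [stepB]
          cases hg : (PySem.Dict.mk graph).get? i with
          | none => rfl
          | some adj => simp only [push_eq_frames]
        constructor
        · intro h
          rw [recA] at h
          cases hg : (PySem.Dict.mk graph).get? i with
          | none => rw [hstep, hg]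
          | some adj =>
            rw [hg] at h
            rw [hstep, hg]
            exact ((IH s (by omega)).2 adj i prev d 1 rest (seq ++ [i])).1 h
        · intro c fuel' h
          rw [recA] at h
          cases hg : (PySem.Dict.mk graph).get? i with
          | none => rw [hg] at h; simp at h
          | some adj =>
            rw [hg] at h
            obtain ⟨L, hL, hrun⟩ := ((IH s (by omega)).2 adj i prev d 1 rest (seq ++ [i])).2 c fuel' h
            refine ⟨i :: L, by push_cast [List.length_cons] at hL ⊢; omega, ?_⟩
            rw [hstep, hg]
            show stepB graph s (framesOf prev i d adj ++ rest) (seq ++ [i]) =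
              stepB graph fuel' rest (seq ++ i :: L)
            rw [hrun, List.append_assoc]
            rfl
    refine ⟨hA, ?_⟩
    intro adj
    induction adj with
    | nil =>
      intro i prev d ctr rest seq
      constructor
      · intro h; rw [recKidsA] at h; simp at h
      · intro c fuel' h
        rw [recKidsA] at h
        simp at h
        obtain ⟨hc, hf⟩ := h
        refine ⟨[], by simp [hc], ?_⟩
        simp [framesOf, hf]
    | cons x r ihr =>
      intro i prev d ctr rest seq
      obtain ⟨j, w⟩ := x
      by_cases hj : j ≠ prev
      · have hframes : framesOf prev i d ((j, w) :: r) = (j, i, d + w) :: framesOf prev i d r := by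
          simp [framesOf, hj]
        constructor
        · intro h
          simp only [recKidsA] at h
          rw [if_pos hj] at h
          rw [hframes, List.cons_append]
          cases hr : recA graph fuel j i (d + w) with
          | none => exact (hA j i (d + w) (framesOf prev i d r ++ rest) seq).1 hr
          | some p =>
            obtain ⟨c0, f0⟩ := p
            rw [hr] at h
            have h2 : recKidsA graph (min f0 fuel) r i prev d (ctr + c0) = none := h
            obtain ⟨L0, hL0, hrun0⟩ :=
              (hA j i (d + w) (framesOf prev i d r ++ rest) seq).2 c0 f0 hr
            rw [hrun0]
            have hf0 : f0 ≤ fuel := (fuel_le graph fuel).1 j i (d + w) c0 f0 hr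
            rw [Nat.min_eq_left hf0] at h2
            rcases Nat.lt_or_eq_of_le hf0 with hlt | heq
            · exact ((IH f0 hlt).2 r i prev d (ctr + c0) rest (seq ++ L0)).1 h2
            · subst heq
              exact (ihr i prev d (ctr + c0) rest (seq ++ L0)).1 h2
        · intro c fuel' h
          simp only [recKidsA] at h
          rw [if_pos hj] at h
          rw [hframes, List.cons_append]
          cases hr : recA graph fuel j i (d + w) with
          | none => rw [hr] at h; simp at h
          | some p =>
            obtain ⟨c0, f0⟩ := p
            rw [hr] at h
            have h2 : recKidsA graph (min f0 fuel) r i prev d (ctr + c0) = some (c, fuel') := h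
            obtain ⟨L0, hL0, hrun0⟩ :=
              (hA j i (d + w) (framesOf prev i d r ++ rest) seq).2 c0 f0 hr
            have hf0 : f0 ≤ fuel := (fuel_le graph fuel).1 j i (d + w) c0 f0 hr
            rw [Nat.min_eq_left hf0] at h2
            have hK : ∀ c fuel'', recKidsA graph f0 r i prev d (ctr + c0) = some (c, fuel'') →
                ∃ L : List Int, (L.length : Int) = c - (ctr + c0) ∧
                  stepB graph f0 (framesOf prev i d r ++ rest) (seq ++ L0) =
                    stepB graph fuel'' rest ((seq ++ L0) ++ L) := by
              rcases Nat.lt_or_eq_of_le hf0 with hlt | heq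
              · exact fun c fuel'' hh =>
                  ((IH f0 hlt).2 r i prev d (ctr + c0) rest (seq ++ L0)).2 c fuel'' hh
              · subst heq
                exact fun c fuel'' hh =>
                  (ihr i prev d (ctr + c0) rest (seq ++ L0)).2 c fuel'' hh
            obtain ⟨L1, hL1, hrun1⟩ := hK c fuel' h2
            refine ⟨L0 ++ L1, ?_, ?_⟩
            · simp only [List.length_append]; push_cast; omega
            · rw [hrun0, hrun1, List.append_assoc]
      · have hj' : j = prev := by exact not_not.mp hj
        have hframes : framesOf prev i d ((j, w) :: r) = framesOf prev i d r := by
          simp [framesOf, hj']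
        have hrec : recKidsA graph fuel ((j, w) :: r) i prev d ctr =
            recKidsA graph fuel r i prev d ctr := by
          rw [recKidsA]; simp [hj']
        rw [hframes, hrec]
        exact ihr i prev d ctr rest seq

-- ===== VERDICT (by name: the statement is the Claim_ definition above) =====
theorem DFS_spec : Claim_equal_DFS := by
  intro graph i prev subsizes order dists d _ _
  unfold Spec_DFS DFS DFS_alt
  cases h : recA graph (pvFuel graph) i prev d with
  | none =>
    have := ((simulation graph (pvFuel graph)).1 i prev d [] []).1 h
    rw [this]
  | some p =>
    obtain ⟨c, fuel'⟩ := p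
    obtain ⟨L, hL, hrun⟩ := ((simulation graph (pvFuel graph)).1 i prev d [] []).2 c fuel' h
    rw [hrun]
    have : stepB graph fuel' [] ([] ++ L) = some ([] ++ L) := by rw [stepB]
    rw [this]
    simpa using hL.symm
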